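-- pv_equiv track=rewrite | github.com/couchbaselabs/mobile-testkit | libraries/testkit/config.py | convert_to_valid_json
-- ===== SOURCE A (Python) =====
-- def convert_to_valid_json(invalid_json):
--
--     """
--     Copied and pasted from https://github.com/couchbase/sync_gateway/blob/master/tools/password_remover.py
--
--     TODO: share common code somehow
--     """
--
--     STATE_OUTSIDE_BACKTICK = "STATE_OUTSIDE_BACKTICK"
--     STATE_INSIDE_BACKTICK = "STATE_INSIDE_BACKTICK"
--     state = STATE_OUTSIDE_BACKTICK
--     output = []
--     sync_function_buffer = []
--
--     # Strip newlines
--     invalid_json = invalid_json.replace('\n', '')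
--
--     # Strip tabs
--     invalid_json = invalid_json.replace('\t', '')
--
--     # read string char by char
--     for json_char in invalid_json:
--
--         # if non-backtick character:
--         if json_char != '`':
--
--             # if in OUTSIDE_BACKTICK state
--             if state == STATE_OUTSIDE_BACKTICK:
--                 # append char to output
--                 output.append(json_char)
--
--             # if in INSIDE_BACKTICK state
--             elif state == STATE_INSIDE_BACKTICK:
--                 # append to sync_function_buffer
--                 sync_function_buffer.append(json_char)
--
--         # if backtick character
--         elif json_char == '`':
--
--             # if in OUTSIDE_BACKTICK state
--             if state == STATE_OUTSIDE_BACKTICK: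
--                 # transition to INSIDE_BACKTICK state
--                 state = STATE_INSIDE_BACKTICK
--
--             # if in INSIDE_BACKTICK state
--             elif state == STATE_INSIDE_BACKTICK:
--                 # run sync_function_buffer through escape_json_value()
--                 sync_function_buffer_str = "".join(sync_function_buffer)
--                 sync_function_buffer_str = escape_json_value(sync_function_buffer_str)
--
--                 # append to output
--                 output.append('"')  # append a double quote
--                 output.append(sync_function_buffer_str)
--                 output.append('"')  # append a double quote
--
--                 # empty the sync_function_buffer
--                 sync_function_buffer = []
--
--                 # transition to OUTSIDE_BACKTICK state
--                 state = STATE_OUTSIDE_BACKTICK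
--
--     output_str = "".join(output)
--     return output_str
--
-- def escape_json_value(raw_value):
--     """
--
--     Copied and pasted from https://github.com/couchbase/sync_gateway/blob/master/tools/password_remover.py
--
--     TODO: share common code somehow
--
--     Escape all invalid json characters like " to produce a valid json value
--
--     Before:
--
--     function(doc, oldDoc) {            if (doc.type == "reject_me") {
--
--     After:
--
--     function(doc, oldDoc) {            if (doc.type == \"reject_me\") {
--
--     """
--     escaped = raw_value
--     escaped = escaped.replace('\\', "\\\\")  # Escape any backslashes
--     escaped = escaped.replace('"', '\\"')    # Escape double quotes
--     escaped = escaped.replace("'", "\\'")    # Escape single quotes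
--
--     # TODO: other stuff should be escaped like \n \t and other control characters
--     # See http://stackoverflow.com/questions/983451/where-can-i-find-a-list-of-escape-characters-required-for-my-json-ajax-return-ty
--
--     return escaped
-- ===== SOURCE B (Python) =====
-- def convert_to_valid_json(invalid_json):
--     # Split once on backticks instead of a char-by-char state machine:
--     # even segments are outside backticks (verbatim), odd segments are inside
--     # (quoted + escaped); a trailing unterminated segment is dropped, as in A.
--     s = invalid_json.replace('\n', '').replace('\t', '')
--     return _emit(s.split('`'), False)
--
--
-- def _emit(parts, inside):
--     if not parts:
--         return ''
--     if not inside: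
--         return parts[0] + _emit(parts[1:], True)
--     if len(parts) == 1:
--         # unterminated trailing backtick segment: never flushed
--         return ''
--     return '"' + escape_json_value(parts[0]) + '"' + _emit(parts[1:], False)
--
--
-- def escape_json_value(raw_value):
--     escaped = raw_value
--     escaped = escaped.replace('\\', "\\\\")
--     escaped = escaped.replace('"', '\\"')
--     escaped = escaped.replace("'", "\\'")
--     return escaped
-- ===== Notes on version B (the rewrite author's own statement) =====
-- stated objective: simpler
-- what changed: Replaces the char-by-char two-state machine with buffer bookkeeping by a single split on backticks followed by structural recursion over the segments (even segments verbatim, odd segments quoted+escaped, a trailing unterminated segment dropped).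
import Mathlib
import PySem

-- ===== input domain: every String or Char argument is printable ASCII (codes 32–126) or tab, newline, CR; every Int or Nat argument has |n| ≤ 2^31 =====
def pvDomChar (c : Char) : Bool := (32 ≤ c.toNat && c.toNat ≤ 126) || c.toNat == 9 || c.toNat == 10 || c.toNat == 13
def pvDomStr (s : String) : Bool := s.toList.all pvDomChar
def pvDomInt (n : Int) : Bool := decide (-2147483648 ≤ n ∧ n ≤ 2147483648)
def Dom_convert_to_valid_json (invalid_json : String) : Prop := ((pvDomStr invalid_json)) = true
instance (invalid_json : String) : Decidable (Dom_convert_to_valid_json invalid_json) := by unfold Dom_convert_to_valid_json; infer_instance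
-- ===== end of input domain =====

-- B replaces A's char-by-char two-state machine by one split on backticks plus
-- structural recursion over the segments (objective: simpler decomposition).

-- shared helper: escape_json_value (identical code in both Python sources)
def escape_json_value (raw_value : List Char) : List Char :=
  PySem.Chars.replace
    (PySem.Chars.replace
      (PySem.Chars.replace raw_value ['\\'] ['\\', '\\'])
      ['"'] ['\\', '"'])
    ['\''] ['\\', '\'']

-- ===== PORT A =====
-- loop body of A: state = (inside-backtick?, output, sync_function_buffer)
def aStep (st : Bool × List Char × List Char) (json_char : Char) :
    Bool × List Char × List Char :=
  if json_char ≠ '`' then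
    if st.1 = false then (false, st.2.1 ++ [json_char], st.2.2)
    else (true, st.2.1, st.2.2 ++ [json_char])
  else
    if st.1 = false then (true, st.2.1, st.2.2)
    else (false, st.2.1 ++ '"' :: escape_json_value st.2.2 ++ ['"'], [])

def convert_to_valid_json (invalid_json : String) : String :=
  let cs := PySem.Chars.replace
              (PySem.Chars.replace invalid_json.toList ['\n'] []) ['\t'] []
  String.mk (cs.foldl aStep (false, [], [])).2.1

-- ===== PORT B =====
-- B's helper _emit(parts, inside): even segments verbatim, odd quoted+escaped,
-- a final unterminated segment dropped
def emitParts : List (List Char) → Bool → List Char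
  | [], _ => []
  | p :: ps, false => p ++ emitParts ps true
  | [_], true => []
  | p :: ps, true => '"' :: escape_json_value p ++ '"' :: emitParts ps false

def convert_to_valid_json_alt (invalid_json : String) : String :=
  let cs := PySem.Chars.replace
              (PySem.Chars.replace invalid_json.toList ['\n'] []) ['\t'] []
  String.mk (emitParts (cs.splitOn '`') false)

-- ===== PRECONDITION & SPEC =====
def Spec_convert_to_valid_json (invalid_json : String) (out : String) : Prop := out = convert_to_valid_json_alt invalid_json
instance (invalid_json : String) (out : String) : Decidable (Spec_convert_to_valid_json invalid_json out) := by unfold Spec_convert_to_valid_json; infer_instance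

-- ===== CLAIM (what is proved, stated in full; the proofs are below) =====
def Claim_equal_convert_to_valid_json : Prop := ∀ (invalid_json : String), Dom_convert_to_valid_json invalid_json → Spec_convert_to_valid_json invalid_json (convert_to_valid_json invalid_json)

-- ===== LEMMAS AND PROOFS =====

-- common recursive characterisation of the state machine over the char stream
def machine (inside : Bool) (buf : List Char) : List Char → List Char
  | [] => []
  | c :: cs =>
    if c = '`' then
      if inside then '"' :: escape_json_value buf ++ '"' :: machine false [] cs
      else machine true buf cs
    else
      if inside then machine true (buf ++ [c]) cs
      else c :: machine false buf cs

-- A's foldl computes `machine`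
theorem foldl_aStep_eq_machine (cs : List Char) :
    ∀ (inside : Bool) (out buf : List Char),
      (cs.foldl aStep (inside, out, buf)).2.1 = out ++ machine inside buf cs := by
  induction cs with
  | nil => intro inside out buf; simp [machine]
  | cons c cs ih =>
    intro inside out buf
    by_cases hc : c = '`' <;> cases inside <;>
      simp [aStep, hc, machine, ih, List.append_assoc]

-- B's segment recursion computes `machine` on the un-split stream
theorem machine_eq_emitParts (cs : List Char) :
    machine false [] cs = emitParts (cs.splitOn '`') false ∧
    ∀ buf, machine true buf cs =
      emitParts (List.modifyHead (buf ++ ·) (cs.splitOn '`')) true := by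
  induction cs with
  | nil => simp [machine, List.splitOn, List.splitOnP_nil, emitParts]
  | cons c cs ih =>
    obtain ⟨ihE, ihO⟩ := ih
    obtain ⟨p, ps, hps⟩ := List.exists_cons_of_ne_nil
      (List.splitOnP_ne_nil (· == '`') cs)
    simp only [List.splitOn] at ihE ihO ⊢
    rw [hps] at ihE ihO
    rw [List.splitOnP_cons, hps]
    by_cases hc : c = '`'
    · rw [if_pos (by simp [hc])]
      constructor
      · simpa [machine, hc, emitParts] using ihO []
      · intro buf
        simp [machine, hc, emitParts, ihE]
    · rw [if_neg (by simp [hc]), List.modifyHead_cons]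
      constructor
      · cases ps <;> simp [machine, hc, emitParts, ihE]
      · intro buf
        have h := ihO (buf ++ [c])
        rw [List.modifyHead_cons] at h
        cases ps <;>
          simp_all [machine, emitParts, List.append_assoc]

-- ===== VERDICT (by name: the statement is the Claim_ definition above) =====
theorem convert_to_valid_json_spec : Claim_equal_convert_to_valid_json := by
  intro s _
  show convert_to_valid_json s = convert_to_valid_json_alt s
  simp only [convert_to_valid_json, convert_to_valid_json_alt,
    foldl_aStep_eq_machine, (machine_eq_emitParts _).1, List.nil_append]
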